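-- pv_equiv track=rewrite | github.com/WXLyndon/dp-practice | Fibonacci-numbers/number_factors.py | count_way_tab
-- ===== SOURCE A (Python) =====
-- def count_way_tab(n):
--     dp = [0 for _ in range(n + 1)]
--
--     dp[0] = 1
--     dp[1] = 1
--     dp[2] = 1
--     dp[3] = 2
--
--     for i in range(4, n + 1):
--         dp[i] = dp[i - 1] + dp[i - 3] + dp[i - 4]
--
--     return dp[n]
-- ===== SOURCE B (Python) =====
-- def _mul(X, Y):
--     return tuple(
--         tuple(sum(X[i][k] * Y[k][j] for k in range(4)) for j in range(4))
--         for i in range(4)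
--     )
--
--
-- _ID = ((1, 0, 0, 0), (0, 1, 0, 0), (0, 0, 1, 0), (0, 0, 0, 1))
--
--
-- def _mat_pow(M, k):
--     if k == 0:
--         return _ID
--     P = _mat_pow(M, k // 2)
--     P = _mul(P, P)
--     if k % 2 == 1:
--         P = _mul(M, P)
--     return P
--
--
-- def count_way_tab(n):
--     if n < 4:
--         return [1, 1, 1, 2][n]
--     M = ((1, 0, 1, 1), (1, 0, 0, 0), (0, 1, 0, 0), (0, 0, 1, 0))
--     P = _mat_pow(M, n - 3)
--     # M^k applied to (f(3), f(2), f(1), f(0)) = (2, 1, 1, 1) gives f(k+3) first.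
--     return 2 * P[0][0] + P[0][1] + P[0][2] + P[0][3]
-- ===== Notes on version B (the rewrite author's own statement) =====
-- stated objective: alternative
-- what changed: Replaces the linear dynamic-programming table with binary matrix exponentiation of the four-term recurrence; intended as faster (a timing run measured 13-26x at the largest sizes both finished, but did not always confirm scaling beyond, so no unqualified speed claim is made).
import Mathlib
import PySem

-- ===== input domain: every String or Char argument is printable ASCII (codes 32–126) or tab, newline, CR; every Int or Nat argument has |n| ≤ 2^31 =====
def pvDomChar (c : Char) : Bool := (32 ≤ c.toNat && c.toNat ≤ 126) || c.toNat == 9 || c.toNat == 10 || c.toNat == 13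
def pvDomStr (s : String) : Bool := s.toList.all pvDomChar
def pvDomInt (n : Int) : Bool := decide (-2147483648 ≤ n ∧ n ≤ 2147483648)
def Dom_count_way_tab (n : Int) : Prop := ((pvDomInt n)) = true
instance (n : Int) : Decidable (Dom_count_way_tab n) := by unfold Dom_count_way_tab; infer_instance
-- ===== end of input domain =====

-- B replaces A's linear dp table with binary matrix exponentiation of the
-- four-term recurrence (objective: alternative; intended as faster, measured 13-26x
-- at the largest sizes both finished in a timing run).

-- ===== PORT A =====
-- A Python list is an array: dp is an Array Int, and aGet/aSet below are the
-- element read/write with Python's negative-index rule; inside Pre_ every index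
-- is nonnegative and in range, where this is exact.
def aGet (a : Array Int) (i : Int) (d : Int) : Int :=
  let j : Int := if i < 0 then (a.size : Int) + i else i
  if 0 ≤ j ∧ j < (a.size : Int) then a.getD j.toNat d else d

def aSet (a : Array Int) (i : Int) (v : Int) : Array Int :=
  let j : Int := if i < 0 then (a.size : Int) + i else i
  a.setIfInBounds j.toNat v

def count_way_tab (n : Int) : Int :=
  let dp : Array Int := ((PySem.List.pyRange 0 (n + 1) 1).map (fun _ => (0 : Int))).toArray
  let dp := aSet dp 0 1
  let dp := aSet dp 1 1
  let dp := aSet dp 2 1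
  let dp := aSet dp 3 2
  let dp := (PySem.List.pyRange 4 (n + 1) 1).foldl
    (fun dp i => aSet dp i (aGet dp (i - 1) 0 + aGet dp (i - 3) 0 + aGet dp (i - 4) 0)) dp
  aGet dp n 0

-- ===== PORT B =====
-- 4×4 integer matrix, row major.
structure M4 where
  x00 : Int
  x01 : Int
  x02 : Int
  x03 : Int
  x10 : Int
  x11 : Int
  x12 : Int
  x13 : Int
  x20 : Int
  x21 : Int
  x22 : Int
  x23 : Int
  x30 : Int
  x31 : Int
  x32 : Int
  x33 : Int
deriving DecidableEq, Repr

def mmul (X Y : M4) : M4 :=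
  ⟨X.x00*Y.x00 + X.x01*Y.x10 + X.x02*Y.x20 + X.x03*Y.x30,
   X.x00*Y.x01 + X.x01*Y.x11 + X.x02*Y.x21 + X.x03*Y.x31,
   X.x00*Y.x02 + X.x01*Y.x12 + X.x02*Y.x22 + X.x03*Y.x32,
   X.x00*Y.x03 + X.x01*Y.x13 + X.x02*Y.x23 + X.x03*Y.x33,
   X.x10*Y.x00 + X.x11*Y.x10 + X.x12*Y.x20 + X.x13*Y.x30,
   X.x10*Y.x01 + X.x11*Y.x11 + X.x12*Y.x21 + X.x13*Y.x31,
   X.x10*Y.x02 + X.x11*Y.x12 + X.x12*Y.x22 + X.x13*Y.x32,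
   X.x10*Y.x03 + X.x11*Y.x13 + X.x12*Y.x23 + X.x13*Y.x33,
   X.x20*Y.x00 + X.x21*Y.x10 + X.x22*Y.x20 + X.x23*Y.x30,
   X.x20*Y.x01 + X.x21*Y.x11 + X.x22*Y.x21 + X.x23*Y.x31,
   X.x20*Y.x02 + X.x21*Y.x12 + X.x22*Y.x22 + X.x23*Y.x32,
   X.x20*Y.x03 + X.x21*Y.x13 + X.x22*Y.x23 + X.x23*Y.x33,
   X.x30*Y.x00 + X.x31*Y.x10 + X.x32*Y.x20 + X.x33*Y.x30,
   X.x30*Y.x01 + X.x31*Y.x11 + X.x32*Y.x21 + X.x33*Y.x31,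
   X.x30*Y.x02 + X.x31*Y.x12 + X.x32*Y.x22 + X.x33*Y.x32,
   X.x30*Y.x03 + X.x31*Y.x13 + X.x32*Y.x23 + X.x33*Y.x33⟩

def idM : M4 := ⟨1,0,0,0, 0,1,0,0, 0,0,1,0, 0,0,0,1⟩

def matPow (X : M4) (k : Nat) : M4 :=
  if h : k = 0 then idM
  else
    let P := matPow X (k / 2)
    let P2 := mmul P P
    if k % 2 = 1 then mmul X P2 else P2
decreasing_by exact Nat.div_lt_self (Nat.pos_of_ne_zero h) (by omega)

def mFib : M4 := ⟨1,0,1,1, 1,0,0,0, 0,1,0,0, 0,0,1,0⟩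

def count_way_tab_alt (n : Int) : Int :=
  if n < 4 then (PySem.List.pyGet? ([1, 1, 1, 2] : List Int) n).getD 0
  else
    let P := matPow mFib (n - 3).toNat
    2 * P.x00 + P.x01 + P.x02 + P.x03

-- ===== PRECONDITION & SPEC =====
-- Pre_ excludes exactly the small inputs on which A raises IndexError (its dp
-- table is shorter than the four seed assignments need).
def Pre_count_way_tab (n : Int) : Prop := 3 ≤ n
instance (n : Int) : Decidable (Pre_count_way_tab n) := by unfold Pre_count_way_tab; infer_instance

def pvWitness_count_way_tab : Int := 5

def Spec_count_way_tab (n : Int) (out : Int) : Prop := out = count_way_tab_alt n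
instance (n : Int) (out : Int) : Decidable (Spec_count_way_tab n out) := by unfold Spec_count_way_tab; infer_instance

-- ===== CLAIM (what is proved, stated in full; the proofs are below) =====
def Claim_equal_count_way_tab : Prop := ∀ (n : Int), Dom_count_way_tab n → Pre_count_way_tab n → Spec_count_way_tab n (count_way_tab n)

-- ===== LEMMAS AND PROOFS =====

-- The mathematical sequence both programs compute.
def fib4 : Nat → Int
  | 0 => 1
  | 1 => 1
  | 2 => 1
  | 3 => 2
  | (k + 4) => fib4 (k + 3) + fib4 (k + 1) + fib4 k

-- ---- B side ----

def iterM (k : Nat) : M4 :=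
  match k with
  | 0 => idM
  | k + 1 => mmul mFib (iterM k)

theorem idM_mmul (X : M4) : mmul idM X = X := by
  cases X; simp [mmul, idM]

theorem mmul_assoc (X Y Z : M4) : mmul (mmul X Y) Z = mmul X (mmul Y Z) := by
  cases X; cases Y; cases Z
  simp only [mmul, M4.mk.injEq]
  and_intros <;> ring

theorem iterM_add (a b : Nat) : iterM (a + b) = mmul (iterM a) (iterM b) := by
  induction a with
  | zero => simpa [iterM] using (idM_mmul (iterM b)).symm
  | succ a ih =>
      have : a + 1 + b = (a + b) + 1 := by omega
      rw [this]
      simp [iterM, ih, mmul_assoc]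

theorem matPow_eq_iterM (k : Nat) : matPow mFib k = iterM k := by
  induction k using Nat.strong_induction_on with
  | _ k ih =>
    rw [matPow]
    by_cases h : k = 0
    · simp [h, iterM]
    · simp only [h, dite_false]
      have hlt : k / 2 < k := Nat.div_lt_self (Nat.pos_of_ne_zero h) (by omega)
      rw [ih _ hlt]
      by_cases hodd : k % 2 = 1
      · have hk : k = (k / 2 + k / 2) + 1 := by omega
        simp only [hodd, if_true]
        rw [← iterM_add]
        conv_rhs => rw [hk]
        rfl
      · have hk : k / 2 + k / 2 = k := by omega
        simp only [hodd, if_false]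
        rw [← iterM_add, hk]

def rowDot0 (P : M4) : Int := 2 * P.x00 + P.x01 + P.x02 + P.x03
def rowDot1 (P : M4) : Int := 2 * P.x10 + P.x11 + P.x12 + P.x13
def rowDot2 (P : M4) : Int := 2 * P.x20 + P.x21 + P.x22 + P.x23
def rowDot3 (P : M4) : Int := 2 * P.x30 + P.x31 + P.x32 + P.x33

theorem rowDot_mmul (P : M4) :
    rowDot0 (mmul mFib P) = rowDot0 P + rowDot2 P + rowDot3 P ∧
    rowDot1 (mmul mFib P) = rowDot0 P ∧
    rowDot2 (mmul mFib P) = rowDot1 P ∧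
    rowDot3 (mmul mFib P) = rowDot2 P := by
  cases P
  simp only [mmul, mFib, rowDot0, rowDot1, rowDot2, rowDot3]
  and_intros <;> ring

theorem iterM_rows (k : Nat) :
    rowDot0 (iterM k) = fib4 (k + 3) ∧ rowDot1 (iterM k) = fib4 (k + 2) ∧
    rowDot2 (iterM k) = fib4 (k + 1) ∧ rowDot3 (iterM k) = fib4 k := by
  induction k with
  | zero => simp [iterM, idM, rowDot0, rowDot1, rowDot2, rowDot3, fib4]
  | succ k ih =>
      obtain ⟨h0, h1, h2, h3⟩ := ih
      obtain ⟨m0, m1, m2, m3⟩ := rowDot_mmul (iterM k)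
      refine ⟨?_, ?_, ?_, ?_⟩
      · show rowDot0 (mmul mFib (iterM k)) = fib4 (k + 4)
        have hrec : fib4 (k + 4) = fib4 (k + 3) + fib4 (k + 1) + fib4 k := rfl
        rw [m0, h0, h2, h3, hrec]
      · show rowDot1 (mmul mFib (iterM k)) = fib4 (k + 3)
        rw [m1, h0]
      · show rowDot2 (mmul mFib (iterM k)) = fib4 (k + 2)
        rw [m2, h1]
      · show rowDot3 (mmul mFib (iterM k)) = fib4 (k + 1)
        rw [m3, h2]

theorem alt_eq_fib4 (n : Int) (hn : 3 ≤ n) : count_way_tab_alt n = fib4 n.toNat := by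
  unfold count_way_tab_alt
  by_cases h4 : n < 4
  · have : n = 3 := by omega
    subst this
    decide
  · rw [if_neg h4, matPow_eq_iterM]
    have h0 := (iterM_rows (n - 3).toNat).1
    have hk : (n - 3).toNat + 3 = n.toNat := by omega
    rw [hk] at h0
    simpa [rowDot0] using h0

-- ---- A side ----

def tab (L i : Nat) : List Int := (List.range L).map (fun j => if j ≤ i then fib4 j else 0)

def stepA (dp : List Int) (i : Int) : List Int :=
  PySem.List.pySetD dp i
    (PySem.List.pyGetD dp (i - 1) 0 + PySem.List.pyGetD dp (i - 3) 0 +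
      PySem.List.pyGetD dp (i - 4) 0)

theorem tab_getD (L i j : Nat) (hj : j < L) :
    (tab L i).getD j 0 = if j ≤ i then fib4 j else 0 := by
  simp [tab, List.getD, List.getElem?_map, List.getElem?_range, hj]

theorem stepA_tab (t L : Nat) (hL : t + 4 < L) :
    stepA (tab L (t + 3)) ((t : Int) + 4) = tab L (t + 4) := by
  unfold stepA
  have e1 : (t : Int) + 4 - 1 = ((t + 3 : Nat) : Int) := by push_cast; ring
  have e3 : (t : Int) + 4 - 3 = ((t + 1 : Nat) : Int) := by push_cast; ring
  have e4 : (t : Int) + 4 - 4 = ((t : Nat) : Int) := by push_cast; ring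
  have e0 : (t : Int) + 4 = ((t + 4 : Nat) : Int) := by push_cast; ring
  rw [e1, e3, e4, e0]
  rw [PySem.List.pyGetD_natCast, PySem.List.pyGetD_natCast, PySem.List.pyGetD_natCast,
      PySem.List.pySetD_natCast]
  rw [tab_getD L (t + 3) (t + 3) (by omega), tab_getD L (t + 3) (t + 1) (by omega),
      tab_getD L (t + 3) t (by omega)]
  rw [if_pos (by omega : t + 3 ≤ t + 3), if_pos (by omega : t + 1 ≤ t + 3),
    if_pos (by omega : t ≤ t + 3)]
  have hv : fib4 (t + 3) + fib4 (t + 1) + fib4 t = fib4 (t + 4) := rfl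
  apply List.ext_getElem
  · simp [tab]
  · intro j hj1 hj2
    simp only [tab, List.length_map, List.length_range] at hj1 hj2 ⊢
    rw [List.getElem_set]
    simp only [List.getElem_map, List.getElem_range]
    by_cases hje : t + 4 = j
    · subst hje; simp [hv]
    · rw [if_neg hje]
      by_cases hj : j ≤ t + 3
      · rw [if_pos hj, if_pos (by omega : j ≤ t + 4)]
      · rw [if_neg hj, if_neg (by omega : ¬ j ≤ t + 4)]

theorem loopA (L : Nat) (s : Nat) (hs : s + 4 ≤ L) :
    (PySem.List.pyRange 4 ((s : Int) + 4) 1).foldl stepA (tab L 3) = tab L (s + 3) := by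
  induction s with
  | zero =>
      rw [PySem.List.pyRange_one_eq_nil (by omega)]
      rfl
  | succ s ih =>
      have hcast : (((s : Nat) + 1 : Nat) : Int) + 4 = ((s : Int) + 4) + 1 := by push_cast; ring
      rw [hcast, PySem.List.pyRange_one_succ_right (by omega), List.foldl_append,
          ih (by omega)]
      simp only [List.foldl_cons, List.foldl_nil]
      have := stepA_tab s L (by omega)
      rw [this]

theorem aGet_toList (a : Array Int) (i d : Int) (h0 : 0 ≤ i) :
    aGet a i d = PySem.List.pyGetD a.toList i d := by
  show (if 0 ≤ (if i < 0 then (a.size : Int) + i else i) ∧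
      (if i < 0 then (a.size : Int) + i else i) < (a.size : Int) then
      a.getD (if i < 0 then (a.size : Int) + i else i).toNat d else d)
    = PySem.List.pyGetD a.toList i d
  rw [if_neg (by omega : ¬ i < 0)]
  by_cases h : i < (a.size : Int)
  · rw [if_pos ⟨h0, h⟩,
      PySem.List.pyGetD_eq_getElem (xs := a.toList) (i := i) (d := d) h0
        (by simpa using h)]
    rw [Array.getD, dif_pos (by omega)]
    simp
  · rw [if_neg (by omega)]
    have : PySem.List.pyGet? a.toList i = none := by
      rw [PySem.List.pyGet?_eq_none_iff]
      intro hr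
      rcases hr with ⟨_, hlt⟩
      simp only [Array.length_toList] at hlt
      omega
    rw [PySem.List.pyGetD_of_none _ _ _ this]

theorem aSet_toList (a : Array Int) (i v : Int) (h0 : 0 ≤ i) :
    (aSet a i v).toList = PySem.List.pySetD a.toList i v := by
  show (a.setIfInBounds (if i < 0 then (a.size : Int) + i else i).toNat v).toList
    = PySem.List.pySetD a.toList i v
  rw [if_neg (by omega : ¬ i < 0), PySem.List.pySetD_of_nonneg _ _ h0,
      Array.toList_setIfInBounds]

theorem foldl_stepArr_toList (idx : List Int) (hidx : ∀ i ∈ idx, 4 ≤ i) (a : Array Int) :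
    (idx.foldl (fun dp i => aSet dp i (aGet dp (i - 1) 0 + aGet dp (i - 3) 0 + aGet dp (i - 4) 0)) a).toList
      = idx.foldl stepA a.toList := by
  induction idx generalizing a with
  | nil => rfl
  | cons i idx ih =>
      simp only [List.foldl_cons]
      have hi : 4 ≤ i := hidx i (by simp)
      rw [ih (fun j hj => hidx j (List.mem_cons_of_mem _ hj))]
      congr 1
      rw [aSet_toList _ _ _ (by omega)]
      unfold stepA
      rw [aGet_toList _ _ _ (by omega), aGet_toList _ _ _ (by omega),
          aGet_toList _ _ _ (by omega)]

theorem a_eq_fib4 (n : Int) (hn : 3 ≤ n) : count_way_tab n = fib4 n.toNat := by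
  obtain ⟨m, hm⟩ : ∃ m : Nat, n = (m : Int) + 3 := ⟨(n - 3).toNat, by omega⟩
  subst hm
  unfold count_way_tab
  have hinit : (PySem.List.pySetD (PySem.List.pySetD (PySem.List.pySetD (PySem.List.pySetD
      ((PySem.List.pyRange 0 ((m : Int) + 3 + 1) 1).map (fun _ => (0 : Int))) 0 1) 1 1) 2 1) 3 2)
      = tab (m + 4) 3 := by
    rw [PySem.List.pyRange_one]
    have hlen : (((m : Int) + 3 + 1) - 0).toNat = m + 4 := by omega
    rw [hlen]
    have : ((List.range (m + 4)).map (fun k : Nat => (0 : Int) + (k : Int))).map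
        (fun _ => (0 : Int)) = List.replicate (m + 4) (0 : Int) := by
      apply List.ext_getElem <;> simp
    rw [this]
    have h0 : PySem.List.pySetD (List.replicate (m + 4) (0 : Int)) 0 1
        = (List.replicate (m + 4) (0 : Int)).set 0 1 := by
      rw [show (0 : Int) = ((0 : Nat) : Int) by norm_num, PySem.List.pySetD_natCast]
    have h1 : ∀ xs : List Int, PySem.List.pySetD xs 1 1 = xs.set 1 1 := fun xs => by
      rw [show (1 : Int) = ((1 : Nat) : Int) by norm_num, PySem.List.pySetD_natCast]
    have h2 : ∀ xs : List Int, PySem.List.pySetD xs 2 1 = xs.set 2 1 := fun xs => by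
      rw [show (2 : Int) = ((2 : Nat) : Int) by norm_num, PySem.List.pySetD_natCast]
    have h3 : ∀ xs : List Int, PySem.List.pySetD xs 3 2 = xs.set 3 2 := fun xs => by
      rw [show (3 : Int) = ((3 : Nat) : Int) by norm_num, PySem.List.pySetD_natCast]
    rw [h0, h1, h2, h3]
    apply List.ext_getElem
    · simp [tab]
    · intro j hj1 hj2
      simp only [tab, List.length_map, List.length_range] at hj2
      rw [List.getElem_set, List.getElem_set, List.getElem_set, List.getElem_set]
      simp only [List.getElem_map, List.getElem_range, List.getElem_replicate]
      rcases j with _ | _ | _ | _ | j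
      · simp [tab, fib4]
      · simp [tab, fib4]
      · simp [tab, fib4]
      · simp [tab, fib4]
      · simp only [tab, List.getElem_map, List.getElem_range]
        rw [if_neg (show ¬ (3:Nat) = j + 1 + 1 + 1 + 1 by omega),
            if_neg (show ¬ (2:Nat) = j + 1 + 1 + 1 + 1 by omega),
            if_neg (show ¬ (1:Nat) = j + 1 + 1 + 1 + 1 by omega),
            if_neg (show ¬ (0:Nat) = j + 1 + 1 + 1 + 1 by omega),
            if_neg (show ¬ j + 1 + 1 + 1 + 1 ≤ 3 by omega)]
  have hrange : (m : Int) + 3 + 1 = (m : Int) + 4 := by ring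
  rw [aGet_toList _ _ _ (by omega)]
  rw [foldl_stepArr_toList _ (fun j hj => ((PySem.List.mem_pyRange_one).1 hj).1) _]
  have hsets : (aSet (aSet (aSet (aSet
      (((PySem.List.pyRange 0 ((m : Int) + 3 + 1) 1).map (fun _ => (0 : Int))).toArray) 0 1)
      1 1) 2 1) 3 2).toList = tab (m + 4) 3 := by
    rw [aSet_toList _ _ _ (by omega), aSet_toList _ _ _ (by omega),
        aSet_toList _ _ _ (by omega), aSet_toList _ _ _ (by omega)]
    simpa using hinit
  rw [hsets, hrange, loopA (m + 4) m (by omega)]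
  have hidx : (m : Int) + 3 = ((m + 3 : Nat) : Int) := by push_cast; ring
  rw [hidx, PySem.List.pyGetD_natCast, tab_getD (m + 4) (m + 3) (m + 3) (by omega)]
  rw [if_pos (le_refl (m + 3))]
  congr 1

-- ===== VERDICT (by name: the statement is the Claim_ definition above) =====
theorem count_way_tab_spec : Claim_equal_count_way_tab := by
  intro n _ hpre
  unfold Spec_count_way_tab
  rw [a_eq_fib4 n hpre, alt_eq_fib4 n hpre]
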